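-- pv_equiv track=rewrite | github.com/ranger2204/IntPreps | 202203/reverse.py | reverse_with_delims
-- ===== SOURCE A (Python) =====
-- def reverse_with_delims(inp):
--     tokens = []
--     cur_token = ""
--     pattern = ""
--     for i in range(len(inp)):
--         c = inp[i]
--         if c.isalpha():
--             cur_token += c
--         else:
--             if len(cur_token) > 0:
--                 pattern += 'w'
--                 tokens.append(cur_token)
--             pattern += c
--
--             cur_token = ""
--
--     if len(cur_token) != 0:
--         pattern += 'w'
--         tokens.append(cur_token)
--     tokens = tokens[::-1]
--     token_index = 0
--     out_str = ""
--     for c in pattern: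
--         if c == 'w':
--             out_str += tokens[token_index]
--             token_index += 1
--         else:
--             out_str += c
--     return out_str
-- ===== SOURCE B (Python) =====
-- def reverse_with_delims(inp):
--     # split into maximal runs tagged by isalpha, reverse the word runs, re-join
--     groups = []
--     i, n = 0, len(inp)
--     while i < n:
--         k = inp[i].isalpha()
--         j = i + 1
--         while j < n and inp[j].isalpha() == k:
--             j += 1
--         groups.append((k, inp[i:j]))
--         i = j
--     words = [g for k, g in groups if k]
--     words.reverse()
--     it = iter(words)
--     return ''.join(next(it) if k else g for k, g in groups)
-- ===== Notes on version B (the rewrite author's own statement) =====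
-- stated objective: idiomatic
-- what changed: replaces A's char-by-char state machine that records a marker pattern string and re-scans it with token indices, by splitting the input once into maximal isalpha/non-alpha runs, reversing the list of word runs and joining the runs back with the words consumed from an iterator
import Mathlib
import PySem

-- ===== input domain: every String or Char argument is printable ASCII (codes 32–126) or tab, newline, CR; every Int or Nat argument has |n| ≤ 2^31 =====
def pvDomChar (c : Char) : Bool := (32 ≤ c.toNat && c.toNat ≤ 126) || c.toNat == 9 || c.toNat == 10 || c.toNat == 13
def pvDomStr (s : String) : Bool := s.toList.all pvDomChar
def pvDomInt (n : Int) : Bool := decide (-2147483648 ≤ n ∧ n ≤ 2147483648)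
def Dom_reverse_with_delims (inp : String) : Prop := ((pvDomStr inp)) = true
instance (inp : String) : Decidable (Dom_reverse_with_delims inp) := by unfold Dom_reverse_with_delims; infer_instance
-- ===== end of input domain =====

-- B replaces A's char-by-char state machine (building a marker pattern string) by
-- grouping the input into maximal alpha/non-alpha runs and re-joining with the word runs reversed.


-- ===== PORT A =====
-- first loop of A: state (tokens, cur_token, pattern)
def revA_step (st : List (List Char) × List Char × List Char) (c : Char) :
    List (List Char) × List Char × List Char :=
  if PySem.Chars.isalpha c then (st.1, st.2.1 ++ [c], st.2.2)
  else if st.2.1.length > 0 then (st.1 ++ [st.2.1], [], st.2.2 ++ ['w', c])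
  else (st.1, [], st.2.2 ++ [c])

-- second loop of A: state (out_str, token_index); tokens[token_index] via pyGetD (always in range here)
def revA_out (toks : List (List Char)) (st : List Char × Int) (c : Char) : List Char × Int :=
  if c = 'w' then (st.1 ++ PySem.List.pyGetD toks st.2 [], st.2 + 1) else (st.1 ++ [c], st.2)

def reverse_with_delims (inp : String) : String :=
  let r := inp.toList.foldl revA_step ([], [], [])
  let tokens := if r.2.1.length ≠ 0 then r.1 ++ [r.2.1] else r.1
  let pattern := if r.2.1.length ≠ 0 then r.2.2 ++ ['w'] else r.2.2
  String.ofList (pattern.foldl (revA_out tokens.reverse) ([], 0)).1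

-- ===== PORT B =====
-- maximal runs of equal isalpha-class (Source B's scanning while-loops)
def groupRuns : List Char → List (Bool × List Char)
  | [] => []
  | c :: cs =>
    let k := PySem.Chars.isalpha c
    (k, c :: cs.takeWhile (fun d => PySem.Chars.isalpha d == k)) ::
      groupRuns (cs.dropWhile (fun d => PySem.Chars.isalpha d == k))
termination_by l => l.length
decreasing_by simpa using Nat.lt_succ_of_le (cs.length_dropWhile_le _)

-- join step: emit the next reversed word for an alpha run, the run itself otherwise
def emitGroup (st : List Char × List (List Char)) (g : Bool × List Char) :
    List Char × List (List Char) :=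
  if g.1 then (st.1 ++ st.2.headD [], st.2.tail) else (st.1 ++ g.2, st.2)

def reverse_with_delims_alt (inp : String) : String :=
  let gs := groupRuns inp.toList
  let words := ((gs.filter (fun g => g.1)).map (fun g => g.2)).reverse
  String.ofList (gs.foldl emitGroup ([], words)).1

-- ===== PRECONDITION & SPEC =====
def Spec_reverse_with_delims (inp : String) (out : String) : Prop := out = reverse_with_delims_alt inp
instance (inp : String) (out : String) : Decidable (Spec_reverse_with_delims inp out) := by unfold Spec_reverse_with_delims; infer_instance

-- ===== CLAIM (what is proved, stated in full; the proofs are below) =====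
def Claim_equal_reverse_with_delims : Prop := ∀ (inp : String), Dom_reverse_with_delims inp → Spec_reverse_with_delims inp (reverse_with_delims inp)

-- ===== LEMMAS AND PROOFS =====
def wordsOf (gs : List (Bool × List Char)) : List (List Char) :=
  (gs.filter (fun g => g.1)).map (fun g => g.2)

def flatPat (gs : List (Bool × List Char)) : List Char :=
  gs.flatMap (fun g => if g.1 then ['w'] else g.2)

lemma groupRuns_append_alpha (as l : List Char) (hne : as ≠ [])
    (h : ∀ a ∈ as, PySem.Chars.isalpha a = true)
    (hl : ∀ c ∈ l.head?, PySem.Chars.isalpha c = false) :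
    groupRuns (as ++ l) = (true, as) :: groupRuns l := by
  obtain ⟨a, as', rfl⟩ : ∃ a as', as = a :: as' := by
    cases as with | nil => exact absurd rfl hne | cons a as' => exact ⟨a, as', rfl⟩
  have ha : PySem.Chars.isalpha a = true := h a (by simp)
  have htl : (as' ++ l).takeWhile (fun d => PySem.Chars.isalpha d == PySem.Chars.isalpha a) = as' := by
    rw [List.takeWhile_append_of_pos (fun x hx => by simp [h x (by simp [hx]), ha])]
    have : l.takeWhile (fun d => PySem.Chars.isalpha d == PySem.Chars.isalpha a) = [] := by
      cases l with
      | nil => rfl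
      | cons c cs => simp [List.takeWhile_cons, hl c (by simp), ha]
    simp [this]
  have hdl : (as' ++ l).dropWhile (fun d => PySem.Chars.isalpha d == PySem.Chars.isalpha a) = l := by
    rw [List.dropWhile_append_of_pos (fun x hx => by simp [h x (by simp [hx]), ha])]
    cases l with
    | nil => rfl
    | cons c cs => simp [List.dropWhile_cons, hl c (by simp), ha]
  simp only [ha, beq_true] at htl hdl
  simp [groupRuns, ha, htl, hdl]

lemma flatPat_cons_nonalpha (c : Char) (cs : List Char) (hc : PySem.Chars.isalpha c = false) :
    flatPat (groupRuns (c :: cs)) = c :: flatPat (groupRuns cs) := by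
  cases cs with
  | nil => simp [groupRuns, flatPat, hc]
  | cons d ds =>
    by_cases hd : PySem.Chars.isalpha d = true
    · simp [groupRuns, flatPat, hc, hd, List.takeWhile_cons, List.dropWhile_cons]
    · simp only [Bool.not_eq_true] at hd
      simp [groupRuns, flatPat, hc, hd, List.takeWhile_cons, List.dropWhile_cons]

lemma filter_cons_nonalpha (c : Char) (cs : List Char) (hc : PySem.Chars.isalpha c = false) :
    (groupRuns (c :: cs)).filter (fun g => g.1) = (groupRuns cs).filter (fun g => g.1) := by
  cases cs with
  | nil => simp [groupRuns, hc]
  | cons d ds =>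
    by_cases hd : PySem.Chars.isalpha d = true
    · simp [groupRuns, hc, hd, List.takeWhile_cons, List.dropWhile_cons]
    · simp only [Bool.not_eq_true] at hd
      simp [groupRuns, hc, hd, List.takeWhile_cons, List.dropWhile_cons]

lemma groupRuns_alpha (l : List Char) :
    ∀ g ∈ groupRuns l, ∀ c ∈ g.2, PySem.Chars.isalpha c = g.1 := by
  induction l using groupRuns.induct with
  | case1 => simp [groupRuns]
  | case2 c cs k ih =>
    intro g hg x hx
    rw [groupRuns] at hg
    simp only [List.mem_cons] at hg
    rcases hg with rfl | hg
    · dsimp only at hx ⊢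
      rcases List.mem_cons.mp hx with rfl | hx'
      · rfl
      · have h' := List.mem_takeWhile_imp hx'
        exact eq_of_beq h'
    · exact ih g hg x hx

lemma phase1_spec (l : List Char) : ∀ (tk : List (List Char)) (cur pat : List Char),
    (∀ a ∈ cur, PySem.Chars.isalpha a = true) →
    ((if (l.foldl revA_step (tk, cur, pat)).2.1.length ≠ 0
        then (l.foldl revA_step (tk, cur, pat)).1 ++ [(l.foldl revA_step (tk, cur, pat)).2.1]
        else (l.foldl revA_step (tk, cur, pat)).1),
     (if (l.foldl revA_step (tk, cur, pat)).2.1.length ≠ 0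
        then (l.foldl revA_step (tk, cur, pat)).2.2 ++ ['w']
        else (l.foldl revA_step (tk, cur, pat)).2.2))
    = (tk ++ wordsOf (groupRuns (cur ++ l)), pat ++ flatPat (groupRuns (cur ++ l))) := by
  induction l with
  | nil =>
    intro tk cur pat hcur
    rcases eq_or_ne cur [] with rfl | hne
    · simp [groupRuns, wordsOf, flatPat]
    · have hg := groupRuns_append_alpha cur [] hne hcur (by simp)
      have hnil : groupRuns ([] : List Char) = [] := by rw [groupRuns]
      simp only [List.append_nil, hnil] at hg
      simp [hg, wordsOf, flatPat, hne, List.length_eq_zero_iff]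
  | cons c cs ih =>
    intro tk cur pat hcur
    by_cases hc : PySem.Chars.isalpha c = true
    · have hstep : revA_step (tk, cur, pat) c = (tk, cur ++ [c], pat) := by
        simp [revA_step, hc]
      have hcur' : ∀ a ∈ cur ++ [c], PySem.Chars.isalpha a = true := by
        intro a ha
        rcases List.mem_append.mp ha with h | h
        · exact hcur a h
        · simp only [List.mem_singleton] at h; subst h; exact hc
      have := ih tk (cur ++ [c]) pat hcur'
      have h2 : cur ++ c :: cs = (cur ++ [c]) ++ cs := by simp
      rw [List.foldl_cons, hstep, h2]
      exact this
    · simp only [Bool.not_eq_true] at hc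
      have hwords : wordsOf (groupRuns (c :: cs)) = wordsOf (groupRuns cs) := by
        simp [wordsOf, filter_cons_nonalpha c cs hc]
      rcases eq_or_ne cur [] with rfl | hne
      · have hstep : revA_step (tk, ([] : List Char), pat) c
            = (tk, [], pat ++ [c]) := by simp [revA_step, hc]
        have := ih tk [] (pat ++ [c]) (by simp)
        rw [List.foldl_cons, hstep]
        simp only [List.nil_append] at this ⊢
        rw [hwords, flatPat_cons_nonalpha c cs hc]
        simpa using this
      · have hstep : revA_step (tk, cur, pat) c = (tk ++ [cur], [], pat ++ ['w', c]) := by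
          simp [revA_step, hc, List.length_pos_of_ne_nil hne]
        have hg := groupRuns_append_alpha cur (c :: cs) hne hcur
          (by intro x hx; simp only [List.head?_cons, Option.mem_some_iff] at hx; subst hx; exact hc)
        have hW1 : wordsOf ((true, cur) :: groupRuns (c :: cs))
            = cur :: wordsOf (groupRuns (c :: cs)) := by simp [wordsOf]
        have hF1 : flatPat ((true, cur) :: groupRuns (c :: cs))
            = 'w' :: flatPat (groupRuns (c :: cs)) := by simp [flatPat]
        have := ih (tk ++ [cur]) [] (pat ++ ['w', c]) (by simp)
        rw [List.foldl_cons, hstep, hg, hW1, hwords, hF1, flatPat_cons_nonalpha c cs hc]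
        simp only [List.nil_append] at this
        simpa using this


lemma fold_out_run (toks : List (List Char)) (run : List Char) (h : ∀ c ∈ run, c ≠ 'w') :
    ∀ (out : List Char) (i : Int), run.foldl (revA_out toks) (out, i) = (out ++ run, i) := by
  induction run with
  | nil => intro out i; simp
  | cons c rs ih =>
    intro out i
    have hc : c ≠ 'w' := h c (by simp)
    rw [List.foldl_cons, show revA_out toks (out, i) c = (out ++ [c], i) from by
      simp [revA_out, hc]]
    simpa using ih (fun x hx => h x (by simp [hx])) (out ++ [c]) i

lemma phase2_spec (gs : List (Bool × List Char)) :
    ∀ (toks : List (List Char)) (out : List Char) (n : Nat),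
    (∀ g ∈ gs, g.1 = false → ∀ c ∈ g.2, PySem.Chars.isalpha c = false) →
    n + gs.countP (fun g => g.1) ≤ toks.length →
    ((flatPat gs).foldl (revA_out toks) (out, (n : Int))).1
      = (gs.foldl emitGroup (out, toks.drop n)).1 := by
  induction gs with
  | nil => intro toks out n _ _; simp [flatPat]
  | cons g gs ih =>
    intro toks out n hna hcnt
    have hflat : flatPat (g :: gs) = (if g.1 then ['w'] else g.2) ++ flatPat gs := by
      simp [flatPat]
    rw [hflat, List.foldl_append, List.foldl_cons]
    by_cases hg : g.1 = true
    · have hn : n < toks.length := by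
        simp [List.countP_cons, hg] at hcnt; omega
      have hget : PySem.List.pyGetD toks ((n : Nat) : Int) [] = toks.getD n [] := by
        simp
      have hstep : revA_out toks (out, (n : Int)) 'w'
          = (out ++ toks.getD n [], ((n + 1 : Nat) : Int)) := by
        simp [revA_out, hget]
      have hemit : emitGroup (out, toks.drop n) g = (out ++ toks.getD n [], toks.drop (n + 1)) := by
        simp [emitGroup, hg, List.head?_drop, List.getD_eq_getElem?_getD, List.tail_drop]
      simp only [hg, eq_self_iff_true, if_true, List.foldl_cons, List.foldl_nil, hstep, hemit]
      exact ih toks (out ++ toks.getD n []) (n + 1)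
        (fun g' hg' => hna g' (by simp [hg']))
        (by simp [List.countP_cons, hg] at hcnt; omega)
    · simp only [Bool.not_eq_true] at hg
      have hrun : ∀ c ∈ g.2, c ≠ 'w' := by
        intro c hcm
        have := hna g (by simp) hg c hcm
        intro hcw; subst hcw; exact absurd this (by decide)
      have hemit : emitGroup (out, toks.drop n) g = (out ++ g.2, toks.drop n) := by
        simp [emitGroup, hg]
      simp only [hg, Bool.false_eq_true, if_false, fold_out_run toks g.2 hrun out (n : Int), hemit]
      exact ih toks (out ++ g.2) n (fun g' hg' => hna g' (by simp [hg']))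
        (by simp [List.countP_cons, hg] at hcnt; omega)

-- ===== VERDICT (by name: the statement is the Claim_ definition above) =====
theorem reverse_with_delims_spec : Claim_equal_reverse_with_delims := by
  intro inp _
  show _ = _
  simp only [reverse_with_delims, reverse_with_delims_alt]
  have h1 := phase1_spec inp.toList [] [] [] (by simp)
  simp only [List.nil_append, Prod.mk.injEq] at h1
  rw [h1.1, h1.2]
  congr 1
  have hcnt : (groupRuns inp.toList).countP (fun g => g.1)
      ≤ ((wordsOf (groupRuns inp.toList)).reverse).length := by
    simp [wordsOf, List.countP_eq_length_filter]
  have := phase2_spec (groupRuns inp.toList) ((wordsOf (groupRuns inp.toList)).reverse) [] 0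
    (fun g hg hf c hc => by have := groupRuns_alpha inp.toList g hg c hc; rw [hf] at this; exact this)
    (by simpa using hcnt)
  simpa [wordsOf] using this
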